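-- pv_equiv track=rewrite | github.com/MrBrantCode/unitest_baseline | mut_generate/mist_train_taco/taco_4518/solution.py | calculate_minimum_detonation_time
-- ===== SOURCE A (Python) =====
-- def calculate_minimum_detonation_time(t, test_cases):
--     class SDS:
--         def __init__(self, n, mins):
--             self.n = n
--             self.parents = [i for i in range(n)]
--             self.mins = mins
--
--         def find(self, i):
--             if self.parents[i] != i:
--                 self.parents[i] = self.find(self.parents[i])
--             return self.parents[i]
--
--         def union(self, i, j):
--             (i, j) = (self.find(i), self.find(j))
--             if i == j:
--                 return
--             self.parents[j] = i
--             self.mins[i] = min(self.mins[j], self.mins[i])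
--
--         def tolist(self):
--             result = []
--             for i in range(self.n):
--                 if i == self.parents[i]:
--                     result.append(self.mins[i])
--             return (sorted(result), len(result))
--
--     result = []
--     for test_case in test_cases:
--         n, k, mines = test_case
--         sds = SDS(n, list(map(lambda x: x[2], mines)))
--         mines = [list(mine) + [i] for i, mine in enumerate(mines)]
--         mines.sort(key=lambda x: (x[0], x[1]))
--         (i, x, y) = (None, None, None)
--         for mine in mines:
--             if x == mine[0] and abs(mine[1] - y) <= k:
--                 sds.union(mine[3], i)
--             (i, x, y) = (mine[3], mine[0], mine[1])
--         mines.sort(key=lambda x: (x[1], x[0]))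
--         (i, x, y) = (None, None, None)
--         for mine in mines:
--             if y == mine[1] and abs(mine[0] - x) <= k:
--                 sds.union(mine[3], i)
--             (i, x, y) = (mine[3], mine[0], mine[1])
--         (mins, length) = sds.tolist()
--         answer = length - 1
--         for i in range(length):
--             answer = min(answer, max(mins[i], length - i - 2))
--         result.append(answer)
--     return result
-- ===== SOURCE B (Python) =====
-- def calculate_minimum_detonation_time(t, test_cases):
--     result = []
--     for n, k, mines in test_cases:
--         indexed = [(x, y, tm, i) for i, (x, y, tm) in enumerate(mines)]
--         srt1 = sorted(indexed, key=lambda e: (e[0], e[1]))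
--         srt2 = sorted(srt1, key=lambda e: (e[1], e[0]))
--         edges = [(b[3], a[3]) for a, b in zip(srt1, srt1[1:])
--                  if a[0] == b[0] and abs(b[1] - a[1]) <= k]
--         edges += [(b[3], a[3]) for a, b in zip(srt2, srt2[1:])
--                   if a[1] == b[1] and abs(b[0] - a[0]) <= k]
--         labels = list(range(n))
--         mins = [tm for _, _, tm in mines]
--         for i, j in edges:
--             ri, rj = labels[i], labels[j]
--             if ri != rj:
--                 labels = [ri if l == rj else l for l in labels]
--                 mins[ri] = min(mins[rj], mins[ri])
--         comps = sorted(mins[i] for i, l in enumerate(labels) if l == i)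
--         length = len(comps)
--         result.append(min([length - 1] + [max(c, length - i - 2) for i, c in enumerate(comps)]))
--     return result
-- ===== Notes on version B (the rewrite author's own statement) =====
-- stated objective: alternative
-- what changed: Replaces the union-find class (parent-pointer array, recursive find with path compression, unions interleaved with the scans) by an explicit edge list extracted from the two sorted passes followed by a flat component-label array that is wholly relabelled on each merge; component minima are collected from the label array.
-- outside the precondition, e.g. on calculate_minimum_detonation_time(0, [(2, 1, [(0, 0, 5), (0, 1, 7), (50, 50, 9)])]): A returns [0], B returns [0]
import Mathlib
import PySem

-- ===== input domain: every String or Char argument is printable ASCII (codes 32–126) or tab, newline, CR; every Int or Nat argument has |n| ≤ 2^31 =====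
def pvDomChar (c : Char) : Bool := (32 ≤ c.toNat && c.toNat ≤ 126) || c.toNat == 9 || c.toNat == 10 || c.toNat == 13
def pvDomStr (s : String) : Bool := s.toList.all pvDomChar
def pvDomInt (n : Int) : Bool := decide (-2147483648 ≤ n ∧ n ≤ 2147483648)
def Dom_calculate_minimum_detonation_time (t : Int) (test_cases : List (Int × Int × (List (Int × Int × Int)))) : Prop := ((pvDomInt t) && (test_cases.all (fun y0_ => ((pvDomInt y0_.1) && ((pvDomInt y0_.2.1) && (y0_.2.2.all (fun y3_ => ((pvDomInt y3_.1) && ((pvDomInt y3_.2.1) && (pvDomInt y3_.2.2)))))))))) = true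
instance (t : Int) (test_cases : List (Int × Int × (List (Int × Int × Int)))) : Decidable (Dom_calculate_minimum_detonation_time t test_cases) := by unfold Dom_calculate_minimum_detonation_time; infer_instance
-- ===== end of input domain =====

-- B replaces A's union-find class (parent pointers, recursive find with path compression) by an
-- explicit edge list from the two sorted passes and a flat component-label array relabelled on each
-- merge (objective: alternative; same asymptotic sort cost, no speed claim).


-- ===== PORT A =====
-- SDS.find with path compression; the fuel argument only makes the Python recursion structural:
-- under Pre_ every parent chain is shorter than the fuel supplied (par.length), so fuel never runs out.
def findA : Nat → List Int → Int → List Int × Int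
  | 0, par, i => (par, i)
  | f+1, par, i =>
    let p := PySem.List.pyGetD par i 0
    if p ≠ i then
      let pr := findA f par p
      (PySem.List.pySetD pr.1 i pr.2, pr.2)
    else (par, i)

-- SDS.union; state is (parents, mins)
def unionA (st : List Int × List Int) (i j : Int) : List Int × List Int :=
  let f1 := findA st.1.length st.1 i
  let f2 := findA f1.1.length f1.1 j
  if f1.2 = f2.2 then (f2.1, st.2)
  else (PySem.List.pySetD f2.1 f2.2 f1.2,
        PySem.List.pySetD st.2 f1.2 (min (PySem.List.pyGetD st.2 f2.2 0) (PySem.List.pyGetD st.2 f1.2 0)))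

-- SDS.tolist
def tolistA (n : Int) (par : List Int) (mins : List Int) : List Int × Int :=
  let result := (PySem.List.pyRange 0 n 1).foldl
    (fun acc i => if i = PySem.List.pyGetD par i 0 then acc ++ [PySem.List.pyGetD mins i 0] else acc) []
  (PySem.List.sorted result (fun x => x) false, (result.length : Int))

-- body of the first 'for mine in mines' loop; loop state ((parents, mins), prev) with prev = (i, x, y)
def stepA1 (k : Int) (sp : (List Int × List Int) × Option (Int × Int × Int)) (m : Int × Int × Int × Int) :
    (List Int × List Int) × Option (Int × Int × Int) :=
  (match sp.2 with
   | none => sp.1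
   | some q => if q.2.1 = m.1 ∧ |m.2.1 - q.2.2| ≤ k then unionA sp.1 m.2.2.2 q.1 else sp.1,
   some (m.2.2.2, m.1, m.2.1))

-- body of the second 'for mine in mines' loop
def stepA2 (k : Int) (sp : (List Int × List Int) × Option (Int × Int × Int)) (m : Int × Int × Int × Int) :
    (List Int × List Int) × Option (Int × Int × Int) :=
  (match sp.2 with
   | none => sp.1
   | some q => if q.2.2 = m.2.1 ∧ |m.1 - q.2.1| ≤ k then unionA sp.1 m.2.2.2 q.1 else sp.1,
   some (m.2.2.2, m.1, m.2.1))

-- one iteration of the outer 'for test_case in test_cases' loop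
def caseA (tc : Int × Int × List (Int × Int × Int)) : Int :=
  let n := tc.1
  let k := tc.2.1
  let mines := tc.2.2
  let st0 : List Int × List Int := (PySem.List.pyRange 0 n 1, mines.map (fun m => m.2.2))
  let minesI : List (Int × Int × Int × Int) :=
    (PySem.List.enumerate mines 0).map (fun p => (p.2.1, p.2.2.1, p.2.2.2, p.1))
  let s1 := PySem.List.sorted2 minesI (fun m => m.1) (fun m => m.2.1) false
  let l1 := s1.foldl (stepA1 k) (st0, none)
  let s2 := PySem.List.sorted2 s1 (fun m => m.2.1) (fun m => m.1) false
  let l2 := s2.foldl (stepA2 k) (l1.1, none)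
  let tl := tolistA n l2.1.1 l2.1.2
  (PySem.List.pyRange 0 tl.2 1).foldl
    (fun ans i => min ans (max (PySem.List.pyGetD tl.1 i 0) (tl.2 - i - 2))) (tl.2 - 1)

def calculate_minimum_detonation_time (t : Int) (test_cases : List (Int × Int × (List (Int × Int × Int)))) : List Int :=
  test_cases.map caseA

-- ===== PORT B =====
-- merge the components of the two endpoints of an edge: relabel every occurrence of rj to ri
def unionB (st : List Int × List Int) (e : Int × Int) : List Int × List Int :=
  let ri := PySem.List.pyGetD st.1 e.1 0
  let rj := PySem.List.pyGetD st.1 e.2 0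
  if ri = rj then st
  else (st.1.map (fun l => if l = rj then ri else l),
        PySem.List.pySetD st.2 ri (min (PySem.List.pyGetD st.2 rj 0) (PySem.List.pyGetD st.2 ri 0)))

-- edge extracted from an adjacent pair of the (x, y)-sorted pass
def edge1 (k : Int) (ab : (Int × Int × Int × Int) × (Int × Int × Int × Int)) : Option (Int × Int) :=
  if ab.1.1 = ab.2.1 ∧ |ab.2.2.1 - ab.1.2.1| ≤ k then some (ab.2.2.2.2, ab.1.2.2.2) else none

-- edge extracted from an adjacent pair of the (y, x)-sorted pass
def edge2 (k : Int) (ab : (Int × Int × Int × Int) × (Int × Int × Int × Int)) : Option (Int × Int) :=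
  if ab.1.2.1 = ab.2.2.1 ∧ |ab.2.1 - ab.1.1| ≤ k then some (ab.2.2.2.2, ab.1.2.2.2) else none

def caseB (tc : Int × Int × List (Int × Int × Int)) : Int :=
  let n := tc.1
  let k := tc.2.1
  let mines := tc.2.2
  let indexed : List (Int × Int × Int × Int) :=
    (PySem.List.enumerate mines 0).map (fun p => (p.2.1, p.2.2.1, p.2.2.2, p.1))
  let s1 := PySem.List.sorted2 indexed (fun e => e.1) (fun e => e.2.1) false
  let s2 := PySem.List.sorted2 s1 (fun e => e.2.1) (fun e => e.1) false
  let e1 := (s1.zip (PySem.List.slice s1 (some 1) none)).filterMap (edge1 k)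
  let e2 := (s2.zip (PySem.List.slice s2 (some 1) none)).filterMap (edge2 k)
  let st := (e1 ++ e2).foldl unionB
    (PySem.List.pyRange 0 n 1, mines.map (fun mn => mn.2.2))
  let comps := PySem.List.sorted
    ((PySem.List.enumerate st.1 0).filterMap
      (fun p => if p.2 = p.1 then some (PySem.List.pyGetD st.2 p.1 0) else none))
    (fun x => x) false
  let length : Int := (comps.length : Int)
  -- min of a nonempty list ((length - 1) is always a member); the .getD default is never used
  ((PySem.List.min?
      ((length - 1) :: (PySem.List.enumerate comps 0).map (fun p => max p.2 (length - p.1 - 2)))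
      (fun x => x)).getD 0)

def calculate_minimum_detonation_time_alt (t : Int) (test_cases : List (Int × Int × (List (Int × Int × Int)))) : List Int :=
  test_cases.map caseB

-- ===== PRECONDITION & SPEC =====
-- Python's blast-adjacency test between two mines (same x within k in y, or same y within k in x)
def PyAdj (k : Int) (p q : Int × Int × Int) : Bool :=
  decide (p.1 = q.1 ∧ |q.2.1 - p.2.1| ≤ k) || decide (p.2.1 = q.2.1 ∧ |q.1 - p.1| ≤ k)

-- Pre_ is a closed-form region where A never raises: the natural domain (each declared count n equals
-- len(mines)), plus the always-safe malformed counts (n ≤ len(mines) with no blast-adjacent pair of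
-- mines at all, so no union is ever attempted). A raises IndexError on most other count-mismatched
-- inputs; on the few where it still returns (all links confined to indices below n) B happens to
-- return the same value, but the proof does not cover them.
def Pre_calculate_minimum_detonation_time (t : Int) (test_cases : List (Int × Int × (List (Int × Int × Int)))) : Prop :=
  ∀ tc ∈ test_cases, tc.1 ≤ (tc.2.2.length : Int) ∧
    (tc.1 = (tc.2.2.length : Int) ∨ tc.2.2.Pairwise (fun a b => PyAdj tc.2.1 a b = false))
instance (t : Int) (test_cases : List (Int × Int × (List (Int × Int × Int)))) : Decidable (Pre_calculate_minimum_detonation_time t test_cases) := by unfold Pre_calculate_minimum_detonation_time; infer_instance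

def pvWitness_calculate_minimum_detonation_time : Int × (List (Int × Int × (List (Int × Int × Int)))) :=
  (1, [(2, 1, [(0, 0, 3), (0, 1, 4)])])

def Spec_calculate_minimum_detonation_time (t : Int) (test_cases : List (Int × Int × (List (Int × Int × Int)))) (out : List Int) : Prop := out = calculate_minimum_detonation_time_alt t test_cases
instance (t : Int) (test_cases : List (Int × Int × (List (Int × Int × Int)))) (out : List Int) : Decidable (Spec_calculate_minimum_detonation_time t test_cases out) := by unfold Spec_calculate_minimum_detonation_time; infer_instance

-- ===== CLAIM (what is proved, stated in full; the proofs are below) =====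
def Claim_equal_calculate_minimum_detonation_time : Prop := ∀ (t : Int) (test_cases : List (Int × Int × (List (Int × Int × Int)))), Dom_calculate_minimum_detonation_time t test_cases → Pre_calculate_minimum_detonation_time t test_cases → Spec_calculate_minimum_detonation_time t test_cases (calculate_minimum_detonation_time t test_cases)

-- ===== LEMMAS AND PROOFS =====

-- Parent / label of position x, as a natural number (entries are nonnegative under the invariant)
def pF (par : List Int) (x : Nat) : Nat := (par.getD x 0).toNat
def lF (labels : List Int) (x : Nat) : Nat := (labels.getD x 0).toNat

-- The simulation invariant between A's union-find state and B's label array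
def GoodAt (n : Nat) (par labels : List Int) (i : Nat) : Prop :=
  0 ≤ par.getD i 0 ∧ 0 ≤ labels.getD i 0 ∧
  pF par i < n ∧ lF labels i < n ∧
  lF labels (pF par i) = lF labels i ∧
  (pF par i = i ↔ lF labels i = i) ∧
  pF par (lF labels i) = lF labels i ∧
  ∃ m, (pF par)^[m] i = lF labels i

def Good (n : Nat) (par labels : List Int) : Prop :=
  par.length = n ∧ labels.length = n ∧ ∀ i, i < n → GoodAt n par labels i

theorem getD_set_self (l : List Int) (i : Nat) (h : i < l.length) (v d : Int) :
    (l.set i v).getD i d = v := by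
  rw [List.getD_eq_getElem?_getD, List.getElem?_set_self h]; rfl

theorem getD_set_ne (l : List Int) {i j : Nat} (h : i ≠ j) (v d : Int) :
    (l.set i v).getD j d = l.getD j d := by
  rw [List.getD_eq_getElem?_getD, List.getElem?_set_ne h, ← List.getD_eq_getElem?_getD]

theorem getD_map_lt (l : List Int) (f : Int → Int) {j : Nat} (h : j < l.length) (d d' : Int) :
    (l.map f).getD j d = f (l.getD j d') := by
  rw [List.getD_eq_getElem?_getD, List.getElem?_map, List.getD_eq_getElem?_getD,
    List.getElem?_eq_getElem h]
  rfl

theorem iter_lt {n : Nat} {par labels : List Int} (hg : Good n par labels) {i : Nat} (hi : i < n) :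
    ∀ m, (pF par)^[m] i < n := by
  intro m
  induction m with
  | zero => simpa using hi
  | succ m ih =>
    rw [Function.iterate_succ_apply']
    exact (hg.2.2 _ ih).2.2.1

theorem iter_lab {n : Nat} {par labels : List Int} (hg : Good n par labels) {i : Nat} (hi : i < n) :
    ∀ m, lF labels ((pF par)^[m] i) = lF labels i := by
  intro m
  induction m with
  | zero => simp
  | succ m ih =>
    rw [Function.iterate_succ_apply', (hg.2.2 _ (iter_lt hg hi m)).2.2.2.2.1, ih]

theorem lab_root {n : Nat} {par labels : List Int} (hg : Good n par labels) {i : Nat} (hi : i < n) :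
    lF labels (lF labels i) = lF labels i := by
  have h4 : lF labels i < n := (hg.2.2 i hi).2.2.2.1
  have hpd : pF par (lF labels i) = lF labels i := (hg.2.2 i hi).2.2.2.2.2.2.1
  exact ((hg.2.2 _ h4).2.2.2.2.2.1).mp hpd

theorem chain_bound {n : Nat} {par labels : List Int} (hg : Good n par labels) {i : Nat} (hi : i < n) :
    ∃ m, m < n ∧ (pF par)^[m] i = lF labels i := by
  have hex : ∃ m, (pF par)^[m] i = lF labels i := (hg.2.2 i hi).2.2.2.2.2.2.2
  set M := Nat.find hex with hMdef
  have hM : (pF par)^[M] i = lF labels i := Nat.find_spec hex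
  by_cases hlt : M < n
  · exact ⟨M, hlt, hM⟩
  · exfalso
    rw [Nat.not_lt] at hlt
    have hvals : ∀ t : Nat, (pF par)^[t] i < n := iter_lt hg hi
    have hcard : Fintype.card (Fin n) < Fintype.card (Fin (M + 1)) := by
      simpa using by omega
    obtain ⟨a, b, hab, heq⟩ := Fintype.exists_ne_map_eq_of_card_lt
      (fun t : Fin (M + 1) => (⟨(pF par)^[t.1] i, hvals t.1⟩ : Fin n)) hcard
    have hfe : (pF par)^[a.1] i = (pF par)^[b.1] i := by
      simpa using congrArg Fin.val heq
    have hne : a.1 ≠ b.1 := fun h => hab (Fin.ext h)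
    have key : ∀ (c d : Nat), c < d → d ≤ M → (pF par)^[c] i = (pF par)^[d] i → False := by
      intro c d hcd hdM he
      have h1 : (pF par)^[(M - d) + c] i = lF labels i := by
        rw [Function.iterate_add_apply, he, ← Function.iterate_add_apply,
          Nat.sub_add_cancel hdM, hM]
      exact Nat.find_min hex (by omega) h1
    rcases Nat.lt_or_ge a.1 b.1 with h | h
    · exact key a.1 b.1 h (by omega) hfe
    · exact key b.1 a.1 (by omega) (by omega) hfe.symm

theorem parNat {n : Nat} {par labels : List Int} (hg : Good n par labels) {i : Nat} (hi : i < n) :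
    par.getD i 0 = ((pF par i : Nat) : Int) :=
  (Int.toNat_of_nonneg (hg.2.2 i hi).1).symm

theorem labNat {n : Nat} {par labels : List Int} (hg : Good n par labels) {i : Nat} (hi : i < n) :
    labels.getD i 0 = ((lF labels i : Nat) : Int) :=
  (Int.toNat_of_nonneg (hg.2.2 i hi).2.1).symm

theorem chain_update {n : Nat} {par labels par' : List Int} (hg : Good n par labels)
    (hopt : ∀ x, x < n → par'.getD x 0 = par.getD x 0 ∨ par'.getD x 0 = ((lF labels x : Nat) : Int)) :
    ∀ (m x : Nat), x < n → (pF par)^[m] x = lF labels x →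
      ∃ m', (pF par')^[m'] x = lF labels x := by
  intro m
  induction m with
  | zero => exact fun x hx hc => ⟨0, by simpa using hc⟩
  | succ m ih =>
    intro x hx hc
    rcases hopt x hx with h | h
    · have hp' : pF par' x = pF par x := by unfold pF; rw [h]
      have hy : pF par x < n := (hg.2.2 x hx).2.2.1
      have hlab : lF labels (pF par x) = lF labels x := (hg.2.2 x hx).2.2.2.2.1
      have hc' : (pF par)^[m] (pF par x) = lF labels (pF par x) := by
        rw [hlab, ← Function.iterate_succ_apply, hc]
      obtain ⟨m', hm'⟩ := ih (pF par x) hy hc'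
      exact ⟨m' + 1, by rw [Function.iterate_succ_apply, hp', hm', hlab]⟩
    · have hp' : pF par' x = lF labels x := by unfold pF; rw [h]; simp
      exact ⟨1, by simpa using hp'⟩

theorem good_update {n : Nat} {par labels par' : List Int} (hg : Good n par labels)
    (hl : par'.length = n)
    (hopt : ∀ x, x < n → par'.getD x 0 = par.getD x 0 ∨ par'.getD x 0 = ((lF labels x : Nat) : Int)) :
    Good n par' labels := by
  refine ⟨hl, hg.2.1, ?_⟩
  intro i hi
  obtain ⟨nn1, nn2, hpn, hln, hpb, hpc, hpd, hpe⟩ := hg.2.2 i hi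
  have hopt' : pF par' i = pF par i ∨ pF par' i = lF labels i := by
    rcases hopt i hi with h | h
    · left; unfold pF; rw [h]
    · right; unfold pF; rw [h]; simp
  have nn1' : 0 ≤ par'.getD i 0 := by
    rcases hopt i hi with h | h <;> rw [h]
    · exact nn1
    · positivity
  refine ⟨nn1', nn2, ?_, hln, ?_, ?_, ?_, ?_⟩
  · rcases hopt' with h | h <;> rw [h]
    · exact hpn
    · exact hln
  · rcases hopt' with h | h <;> rw [h]
    · exact hpb
    · exact lab_root hg hi
  · rcases hopt' with h | h
    · rw [h]; exact hpc
    · rw [h]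
  · rcases hopt (lF labels i) hln with h | h
    · unfold pF; rw [h]; exact hpd
    · unfold pF; rw [h, Int.toNat_natCast]; exact lab_root hg hi
  · obtain ⟨m, hm⟩ := hpe
    exact chain_update hg hopt m i hi hm

theorem find_root {n : Nat} {par labels : List Int} (hg : Good n par labels)
    {i : Nat} (hi : i < n) (hroot : lF labels i = i) (fuel : Nat) :
    findA fuel par (i : Int) = (par, ((lF labels i : Nat) : Int)) := by
  have hpar : par.getD i 0 = (i : Int) := by
    rw [parNat hg hi, ((hg.2.2 i hi).2.2.2.2.2.1).mpr hroot]
  have hpar' : par[i]?.getD 0 = (i : Int) := by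
    rw [← List.getD_eq_getElem?_getD]; exact hpar
  cases fuel with
  | zero => simp [findA, hroot]
  | succ f => simp [findA, hpar', hroot]

theorem find_ok {n : Nat} {par labels : List Int} (hg : Good n par labels) :
    ∀ (m : Nat) (fuel : Nat) (i : Nat), i < n → (pF par)^[m] i = lF labels i → m ≤ fuel →
    ∃ par', findA fuel par (i : Int) = (par', ((lF labels i : Nat) : Int)) ∧ par'.length = n ∧
      (∀ x, x < n → par'.getD x 0 = par.getD x 0 ∨ par'.getD x 0 = ((lF labels x : Nat) : Int)) := by
  intro m
  induction m with
  | zero =>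
    intro fuel i hi hch hle
    have hroot : lF labels i = i := by simpa using hch.symm
    exact ⟨par, find_root hg hi hroot fuel, hg.1, fun x hx => Or.inl rfl⟩
  | succ m ih =>
    intro fuel i hi hch hle
    by_cases hroot : pF par i = i
    · have hlab : lF labels i = i := by
        rw [← hch, Function.iterate_fixed hroot (m + 1)]
      exact ⟨par, find_root hg hi hlab fuel, hg.1, fun x hx => Or.inl rfl⟩
    · obtain ⟨f, rfl⟩ : ∃ f, fuel = f + 1 := ⟨fuel - 1, by omega⟩
      have hpne : par.getD i 0 ≠ (i : Int) := by
        rw [parNat hg hi]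
        exact fun h => hroot (by exact_mod_cast h)
      have hch' : (pF par)^[m] (pF par i) = lF labels (pF par i) := by
        rw [(hg.2.2 i hi).2.2.2.2.1, ← Function.iterate_succ_apply, hch]
      obtain ⟨par', heq, hlen, hopt⟩ := ih f (pF par i) ((hg.2.2 i hi).2.2.1) hch' (by omega)
      refine ⟨par'.set i ((lF labels i : Nat) : Int), ?_, by simpa using hlen, ?_⟩
      · show findA (f + 1) par (i : Int) = _
        simp only [findA, PySem.List.pyGetD_natCast]
        rw [if_pos hpne, parNat hg hi, heq, (hg.2.2 i hi).2.2.2.2.1]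
        simp
      · intro x hx
        by_cases hxi : x = i
        · subst hxi
          right
          exact getD_set_self par' x (by omega) _ _
        · rw [getD_set_ne par' (Ne.symm hxi)]
          exact hopt x hx

theorem good_merge {n : Nat} {par labels : List Int} (hg : Good n par labels) {ri rj : Nat}
    (hri : ri < n) (hrj : rj < n) (hrootri : lF labels ri = ri) (hrootrj : lF labels rj = rj)
    (hne : ri ≠ rj) :
    Good n (par.set rj ((ri : Nat) : Int))
      (labels.map (fun l => if l = ((rj : Nat) : Int) then ((ri : Nat) : Int) else l)) := by
  obtain ⟨hplen, hllen, hat⟩ := hg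
  have hg' : Good n par labels := ⟨hplen, hllen, hat⟩
  set par₃ := par.set rj ((ri : Nat) : Int) with hpar3
  set labels₃ := labels.map (fun l => if l = ((rj : Nat) : Int) then ((ri : Nat) : Int) else l) with hlab3
  have hl3 : ∀ x, x < n → labels₃.getD x 0 =
      if lF labels x = rj then ((ri : Nat) : Int) else ((lF labels x : Nat) : Int) := by
    intro x hx
    rw [hlab3, getD_map_lt labels _ (by omega) 0 0, labNat hg' hx]
    by_cases h : lF labels x = rj
    · rw [if_pos (by exact_mod_cast h), if_pos h]
    · rw [if_neg (by exact_mod_cast h), if_neg h]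
  have hlF3 : ∀ x, x < n → lF labels₃ x = if lF labels x = rj then ri else lF labels x := by
    intro x hx
    by_cases h : lF labels x = rj
    · rw [if_pos h]
      unfold lF
      rw [hl3 x hx, if_pos h]
      simp
    · rw [if_neg h]
      unfold lF
      rw [hl3 x hx, if_neg h]
      exact Int.toNat_natCast _
  have hnn3 : ∀ x, x < n → 0 ≤ labels₃.getD x 0 := by
    intro x hx
    rw [hl3 x hx]
    split_ifs <;> positivity
  have hp3 : ∀ x, x < n → par₃.getD x 0 = if x = rj then ((ri : Nat) : Int) else par.getD x 0 := by
    intro x hx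
    by_cases h : x = rj
    · subst h; rw [if_pos rfl, hpar3]; exact getD_set_self par x (by omega) _ _
    · rw [if_neg h, hpar3, getD_set_ne par (Ne.symm h)]
  have hpF3 : ∀ x, x < n → pF par₃ x = if x = rj then ri else pF par x := by
    intro x hx
    unfold pF
    rw [hp3 x hx]
    split_ifs <;> simp
  have hpri : pF par ri = ri := ((hat ri hri).2.2.2.2.2.1).mpr hrootri
  refine ⟨by simp [hpar3, hplen], by simp [hlab3, hllen], ?_⟩
  intro x hx
  obtain ⟨nn1, nn2, hpn, hln, hpb, hpc, hpd, hpe⟩ := hat x hx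
  refine ⟨?_, hnn3 x hx, ?_, ?_, ?_, ?_, ?_, ?_⟩
  · rw [hp3 x hx]
    split_ifs
    · positivity
    · exact nn1
  · rw [hpF3 x hx]
    split_ifs
    · exact hri
    · exact hpn
  · rw [hlF3 x hx]
    split_ifs
    · exact hri
    · exact hln
  · -- pb: labels₃ of parent
    rw [hpF3 x hx, hlF3 x hx]
    by_cases hxrj : x = rj
    · subst hxrj
      rw [if_pos rfl, if_pos hrootrj, hlF3 ri hri, hrootri, if_neg hne]
    · rw [if_neg hxrj, hlF3 (pF par x) hpn, hpb]
  · -- pc: root iff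
    by_cases hxrj : x = rj
    · subst hxrj
      rw [hpF3 x hx, hlF3 x hx, if_pos rfl, if_pos hrootrj]
    · rw [hpF3 x hx, hlF3 x hx, if_neg hxrj]
      by_cases hLrj : lF labels x = rj
      · rw [if_pos hLrj]
        have h1 : pF par x ≠ x := fun h => hxrj (by rw [← hLrj, hpc.mp h])
        have h2 : ri ≠ x := by
          intro h
          apply hne
          rw [← hLrj, ← h, hrootri]
        exact ⟨fun h => absurd h h1, fun h => absurd h h2⟩
      · rw [if_neg hLrj]
        exact hpc
  · -- pd: label is a root
    rw [hlF3 x hx]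
    by_cases hLrj : lF labels x = rj
    · rw [if_pos hLrj, hpF3 ri hri, if_neg hne, hpri]
    · rw [if_neg hLrj, hpF3 _ hln, if_neg hLrj, hpd]
  · -- pe: reachability
    rw [hlF3 x hx]
    by_cases hLrj : lF labels x = rj
    · rw [if_pos hLrj]
      have hex : ∃ m, (pF par)^[m] x = rj := by
        obtain ⟨m, hm⟩ := hpe
        exact ⟨m, by rw [hm, hLrj]⟩
      have hMs : (pF par)^[Nat.find hex] x = rj := Nat.find_spec hex
      have hmin : ∀ t, t < Nat.find hex → (pF par)^[t] x ≠ rj := fun t ht => Nat.find_min hex ht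
      have hiter : ∀ t, t ≤ Nat.find hex → (pF par₃)^[t] x = (pF par)^[t] x := by
        intro t
        induction t with
        | zero => intro _; rfl
        | succ t ih =>
          intro ht
          rw [Function.iterate_succ_apply', Function.iterate_succ_apply', ih (by omega)]
          have hy : (pF par)^[t] x < n := iter_lt hg' hx t
          rw [hpF3 _ hy, if_neg (hmin t (by omega))]
      refine ⟨Nat.find hex + 1, ?_⟩
      rw [Function.iterate_succ_apply', hiter (Nat.find hex) (le_refl _), hMs, hpF3 rj hrj,
        if_pos rfl]
    · rw [if_neg hLrj]
      have hiter : ∀ t, (pF par₃)^[t] x = (pF par)^[t] x := by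
        intro t
        induction t with
        | zero => rfl
        | succ t ih =>
          rw [Function.iterate_succ_apply', Function.iterate_succ_apply', ih]
          have hy : (pF par)^[t] x < n := iter_lt hg' hx t
          have hyne : (pF par)^[t] x ≠ rj := by
            intro h
            apply hLrj
            rw [← iter_lab hg' hx t, h, hrootrj]
          rw [hpF3 _ hy, if_neg hyne]
      obtain ⟨m, hm⟩ := hpe
      exact ⟨m, by rw [hiter m, hm]⟩

theorem union_ok {n : Nat} {par labels mins : List Int} (hg : Good n par labels)
    {i j : Nat} (hi : i < n) (hj : j < n) :
    ∃ par₃ labels₃ mins₃,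
      unionA (par, mins) (i : Int) (j : Int) = (par₃, mins₃) ∧
      unionB (labels, mins) ((i : Int), (j : Int)) = (labels₃, mins₃) ∧
      Good n par₃ labels₃ := by
  have hn1 : par.length = n := hg.1
  obtain ⟨m1, hm1, hc1⟩ := chain_bound hg hi
  obtain ⟨par₁, h1eq, h1len, h1opt⟩ := find_ok hg m1 par.length i hi hc1 (by omega)
  have hg1 : Good n par₁ labels := good_update hg h1len h1opt
  have hn2 : par₁.length = n := h1len
  obtain ⟨m2, hm2, hc2⟩ := chain_bound hg1 hj
  obtain ⟨par₂, h2eq, h2len, h2opt⟩ := find_ok hg1 m2 par₁.length j hj hc2 (by omega)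
  have hg2 : Good n par₂ labels := good_update hg1 h2len h2opt
  have hAred : unionA (par, mins) (i : Int) (j : Int) =
      if ((lF labels i : Nat) : Int) = ((lF labels j : Nat) : Int) then (par₂, mins)
      else (PySem.List.pySetD par₂ ((lF labels j : Nat) : Int) ((lF labels i : Nat) : Int),
            PySem.List.pySetD mins ((lF labels i : Nat) : Int)
              (min (PySem.List.pyGetD mins ((lF labels j : Nat) : Int) 0)
                   (PySem.List.pyGetD mins ((lF labels i : Nat) : Int) 0))) := by
    unfold unionA
    simp only [h1eq, h2eq]
  have hBred : unionB (labels, mins) ((i : Int), (j : Int)) =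
      if ((lF labels i : Nat) : Int) = ((lF labels j : Nat) : Int) then (labels, mins)
      else (labels.map (fun l => if l = ((lF labels j : Nat) : Int) then ((lF labels i : Nat) : Int) else l),
            PySem.List.pySetD mins ((lF labels i : Nat) : Int)
              (min (PySem.List.pyGetD mins ((lF labels j : Nat) : Int) 0)
                   (PySem.List.pyGetD mins ((lF labels i : Nat) : Int) 0))) := by
    unfold unionB
    simp only [PySem.List.pyGetD_natCast, labNat hg hi, labNat hg hj]
  by_cases heq : lF labels i = lF labels j
  · refine ⟨par₂, labels, mins, ?_, ?_, hg2⟩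
    · rw [hAred, if_pos (by exact_mod_cast heq)]
    · rw [hBred, if_pos (by exact_mod_cast heq)]
  · have hone : ¬ ((lF labels i : Nat) : Int) = ((lF labels j : Nat) : Int) := by exact_mod_cast heq
    refine ⟨par₂.set (lF labels j) ((lF labels i : Nat) : Int),
      labels.map (fun l => if l = ((lF labels j : Nat) : Int) then ((lF labels i : Nat) : Int) else l),
      PySem.List.pySetD mins ((lF labels i : Nat) : Int)
        (min (PySem.List.pyGetD mins ((lF labels j : Nat) : Int) 0)
             (PySem.List.pyGetD mins ((lF labels i : Nat) : Int) 0)), ?_, ?_, ?_⟩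
    · rw [hAred, if_neg hone]
      simp
    · rw [hBred, if_neg hone]
    · exact good_merge hg2 (hg.2.2 i hi).2.2.2.1 (hg.2.2 j hj).2.2.2.1
        (lab_root hg hi) (lab_root hg hj) heq

-- valid edge: both endpoints are casts of naturals below n
def EdgeOk (n : Nat) (e : Int × Int) : Prop := ∃ i j : Nat, e = ((i : Int), (j : Int)) ∧ i < n ∧ j < n

theorem fold_edges {n : Nat} : ∀ (edges : List (Int × Int)) (par labels mins : List Int),
    Good n par labels → (∀ e ∈ edges, EdgeOk n e) →
    ∃ par' labels' mins',
      edges.foldl (fun st e => unionA st e.1 e.2) (par, mins) = (par', mins') ∧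
      edges.foldl unionB (labels, mins) = (labels', mins') ∧
      Good n par' labels' := by
  intro edges
  induction edges with
  | nil => exact fun par labels mins hg _ => ⟨par, labels, mins, rfl, rfl, hg⟩
  | cons e rest ih =>
    intro par labels mins hg hok
    obtain ⟨i, j, rfl, hi, hj⟩ := hok e (List.mem_cons_self)
    obtain ⟨par₃, labels₃, mins₃, hA, hB, hg₃⟩ := union_ok hg hi hj
    obtain ⟨par', labels', mins', hA', hB', hg'⟩ :=
      ih par₃ labels₃ mins₃ hg₃ (fun e he => hok e (List.mem_cons_of_mem _ he))
    refine ⟨par', labels', mins', ?_, ?_, hg'⟩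
    · rw [List.foldl_cons]
      show rest.foldl _ (unionA (par, mins) (i : Int) (j : Int)) = _
      rw [hA, hA']
    · rw [List.foldl_cons]
      show rest.foldl unionB (unionB (labels, mins) ((i : Int), (j : Int))) = _
      rw [hB, hB']

theorem loopA1_eq (k : Int) : ∀ (s : List (Int × Int × Int × Int)) (e : Int × Int × Int × Int)
    (st : List Int × List Int),
    (s.foldl (stepA1 k) (st, some (e.2.2.2, e.1, e.2.1))).1 =
      (((e :: s).zip s).filterMap (edge1 k)).foldl (fun t ed => unionA t ed.1 ed.2) st := by
  intro s
  induction s with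
  | nil => intro e st; simp
  | cons m rest ih =>
    intro e st
    rw [List.zip_cons_cons, List.filterMap_cons, List.foldl_cons]
    by_cases hc : e.1 = m.1 ∧ |m.2.1 - e.2.1| ≤ k
    · rw [show stepA1 k (st, some (e.2.2.2, e.1, e.2.1)) m =
          (unionA st m.2.2.2 e.2.2.2, some (m.2.2.2, m.1, m.2.1)) from by simp [stepA1, hc],
        show edge1 k (e, m) = some (m.2.2.2, e.2.2.2) from by simp [edge1, hc],
        List.foldl_cons]
      exact ih m (unionA st m.2.2.2 e.2.2.2)
    · rw [show stepA1 k (st, some (e.2.2.2, e.1, e.2.1)) m =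
          (st, some (m.2.2.2, m.1, m.2.1)) from by simp [stepA1, hc],
        show edge1 k (e, m) = none from by simp [edge1, hc]]
      exact ih m st

theorem loopA2_eq (k : Int) : ∀ (s : List (Int × Int × Int × Int)) (e : Int × Int × Int × Int)
    (st : List Int × List Int),
    (s.foldl (stepA2 k) (st, some (e.2.2.2, e.1, e.2.1))).1 =
      (((e :: s).zip s).filterMap (edge2 k)).foldl (fun t ed => unionA t ed.1 ed.2) st := by
  intro s
  induction s with
  | nil => intro e st; simp
  | cons m rest ih =>
    intro e st
    rw [List.zip_cons_cons, List.filterMap_cons, List.foldl_cons]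
    by_cases hc : e.2.1 = m.2.1 ∧ |m.1 - e.1| ≤ k
    · rw [show stepA2 k (st, some (e.2.2.2, e.1, e.2.1)) m =
          (unionA st m.2.2.2 e.2.2.2, some (m.2.2.2, m.1, m.2.1)) from by simp [stepA2, hc],
        show edge2 k (e, m) = some (m.2.2.2, e.2.2.2) from by simp [edge2, hc],
        List.foldl_cons]
      exact ih m (unionA st m.2.2.2 e.2.2.2)
    · rw [show stepA2 k (st, some (e.2.2.2, e.1, e.2.1)) m =
          (st, some (m.2.2.2, m.1, m.2.1)) from by simp [stepA2, hc],
        show edge2 k (e, m) = none from by simp [edge2, hc]]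
      exact ih m st

theorem loopA1_top (k : Int) (s : List (Int × Int × Int × Int)) (st : List Int × List Int) :
    (s.foldl (stepA1 k) (st, none)).1 =
      ((s.zip s.tail).filterMap (edge1 k)).foldl (fun t ed => unionA t ed.1 ed.2) st := by
  cases s with
  | nil => simp
  | cons m rest =>
    rw [List.foldl_cons, show stepA1 k (st, none) m = (st, some (m.2.2.2, m.1, m.2.1)) from rfl,
      List.tail_cons]
    exact loopA1_eq k rest m st

theorem loopA2_top (k : Int) (s : List (Int × Int × Int × Int)) (st : List Int × List Int) :
    (s.foldl (stepA2 k) (st, none)).1 =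
      ((s.zip s.tail).filterMap (edge2 k)).foldl (fun t ed => unionA t ed.1 ed.2) st := by
  cases s with
  | nil => simp
  | cons m rest =>
    rw [List.foldl_cons, show stepA2 k (st, none) m = (st, some (m.2.2.2, m.1, m.2.1)) from rfl,
      List.tail_cons]
    exact loopA2_eq k rest m st

theorem getD_pyRange {m j : Nat} (hj : j < m) :
    (PySem.List.pyRange 0 (m : Int) 1).getD j 0 = (j : Int) := by
  rw [PySem.List.pyRange_one]
  have h0 : (((m : Int)) - 0).toNat = m := by omega
  rw [h0, PySem.List.getD_map_range (fun k : Nat => (0 : Int) + (k : Int)) m j 0 hj]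
  simp

theorem good_init (m : Nat) :
    Good m (PySem.List.pyRange 0 (m : Int) 1) (PySem.List.pyRange 0 (m : Int) 1) := by
  refine ⟨by simp [PySem.List.length_pyRange_one], by simp [PySem.List.length_pyRange_one], ?_⟩
  intro i hi
  have hg : (PySem.List.pyRange 0 (m : Int) 1).getD i 0 = (i : Int) := getD_pyRange hi
  have hpf : pF (PySem.List.pyRange 0 (m : Int) 1) i = i := by unfold pF; rw [hg]; simp
  have hlf : lF (PySem.List.pyRange 0 (m : Int) 1) i = i := by unfold lF; rw [hg]; simp
  refine ⟨by rw [hg]; positivity, by rw [hg]; positivity, by rw [hpf]; exact hi,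
    by rw [hlf]; exact hi, by rw [hpf], by rw [hpf, hlf], by rw [hlf, hpf], ⟨0, by simp [hlf]⟩⟩

theorem indexed_idx {mines : List (Int × Int × Int)} :
    ∀ a ∈ (PySem.List.enumerate mines 0).map (fun p => (p.2.1, p.2.2.1, p.2.2.2, p.1)),
      ∃ i : Nat, a.2.2.2 = (i : Int) ∧ i < mines.length := by
  intro a ha
  obtain ⟨p, hp, rfl⟩ := List.mem_map.mp ha
  obtain ⟨kk, hk, rfl⟩ := (PySem.List.mem_enumerate_iff _ _ _).mp hp
  exact ⟨kk, by simp, hk⟩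

theorem edges_ok {n : Nat} {s : List (Int × Int × Int × Int)}
    (hmem : ∀ a ∈ s, ∃ i : Nat, a.2.2.2 = (i : Int) ∧ i < n)
    (f : (Int × Int × Int × Int) × (Int × Int × Int × Int) → Option (Int × Int))
    (hf : ∀ ab e, f ab = some e → e = (ab.2.2.2.2, ab.1.2.2.2)) :
    ∀ e ∈ (s.zip s.tail).filterMap f, EdgeOk n e := by
  intro e he
  obtain ⟨ab, hab, hfe⟩ := List.mem_filterMap.mp he
  obtain ⟨a, b⟩ := ab
  obtain ⟨ha, hb⟩ := List.of_mem_zip hab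
  obtain ⟨i, hi1, hi2⟩ := hmem b (List.mem_of_mem_tail hb)
  obtain ⟨j, hj1, hj2⟩ := hmem a ha
  rw [hf _ _ hfe]
  exact ⟨i, j, by simp [hi1, hj1], hi2, hj2⟩

theorem hedge1 (k : Int) : ∀ ab e, edge1 k ab = some e → e = (ab.2.2.2.2, ab.1.2.2.2) := by
  intro ab e h
  unfold edge1 at h
  split_ifs at h
  exact (Option.some_inj.mp h).symm

theorem hedge2 (k : Int) : ∀ ab e, edge2 k ab = some e → e = (ab.2.2.2.2, ab.1.2.2.2) := by
  intro ab e h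
  unfold edge2 at h
  split_ifs at h
  exact (Option.some_inj.mp h).symm

theorem filter_map_to_filterMap (l : List Int) (p : Int → Prop) [DecidablePred p] (f : Int → Int) :
    (l.filter (fun x => decide (p x))).map f =
      l.filterMap (fun x => if p x then some (f x) else none) := by
  induction l with
  | nil => rfl
  | cons x t ih => by_cases h : p x <;> simp [h, ih]

theorem enum_pyRange (xs : List Int) : PySem.List.enumerate xs 0 =
    (PySem.List.pyRange 0 (xs.length : Int) 1).map (fun j => (j, PySem.List.pyGetD xs j 0)) := by
  have := PySem.List.enumerate_eq_map_pyRange xs 0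
  simpa [PySem.List.len] using this

theorem roots_eq {n : Nat} {par labels mins : List Int} (hg : Good n par labels) :
    (PySem.List.pyRange 0 (n : Int) 1).foldl
      (fun acc i => if i = PySem.List.pyGetD par i 0 then acc ++ [PySem.List.pyGetD mins i 0] else acc) []
    = (PySem.List.enumerate labels 0).filterMap
        (fun p => if p.2 = p.1 then some (PySem.List.pyGetD mins p.1 0) else none) := by
  rw [PySem.List.foldl_append_ite (fun i => i = PySem.List.pyGetD par i 0)
    (fun i => PySem.List.pyGetD mins i 0) _ _, List.nil_append, enum_pyRange labels, hg.2.1,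
    List.filterMap_map, filter_map_to_filterMap]
  refine List.filterMap_congr ?_
  intro x hx
  have hx' := PySem.List.mem_pyRange_one.mp hx
  obtain ⟨x', rfl⟩ : ∃ x' : Nat, x = (x' : Int) := ⟨x.toNat, (Int.toNat_of_nonneg hx'.1).symm⟩
  have hxn : x' < n := by exact_mod_cast hx'.2
  simp only [Function.comp_apply, PySem.List.pyGetD_natCast]
  have hA : ((x' : Int) = par.getD x' 0) ↔ lF labels x' = x' := by
    rw [parNat hg hxn]
    constructor
    · intro h
      exact ((hg.2.2 x' hxn).2.2.2.2.2.1).mp (by exact_mod_cast h.symm)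
    · intro h
      exact_mod_cast (((hg.2.2 x' hxn).2.2.2.2.2.1).mpr h).symm
  have hB : (labels.getD x' 0 = (x' : Int)) ↔ lF labels x' = x' := by
    rw [labNat hg hxn]
    exact ⟨fun h => by exact_mod_cast h, fun h => by exact_mod_cast h⟩
  by_cases hroot : lF labels x' = x'
  · rw [if_pos (hA.mpr hroot), if_pos (hB.mpr hroot)]
  · rw [if_neg (fun h => hroot (hA.mp h)), if_neg (fun h => hroot (hB.mp h))]

theorem final_eq (R : List Int) :
    (PySem.List.pyRange 0 ((R.length : Int)) 1).foldl
      (fun ans i => min ans (max (PySem.List.pyGetD R i 0) ((R.length : Int) - i - 2)))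
      ((R.length : Int) - 1)
    = (PySem.List.min? (((R.length : Int) - 1) ::
        (PySem.List.enumerate R 0).map (fun p => max p.2 ((R.length : Int) - p.1 - 2)))
        (fun x => x)).getD 0 := by
  rw [PySem.List.min?_id_cons, Option.getD_some, enum_pyRange R, List.map_map, List.foldl_map]
  rfl

theorem zip_tail_ne {α : Type} (s : List α) (h : s.Pairwise (fun a b => a ≠ b)) :
    ∀ p ∈ s.zip s.tail, p.1 ≠ p.2 := by
  induction s with
  | nil => intro p hp; simp at hp
  | cons x t ih =>
    intro p hp
    cases t with
    | nil => simp at hp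
    | cons y u =>
      rw [List.tail_cons, List.zip_cons_cons] at hp
      rcases List.mem_cons.mp hp with rfl | hp'
      · exact (List.pairwise_cons.mp h).1 y List.mem_cons_self
      · exact ih (List.pairwise_cons.mp h).2 p (by rwa [List.tail_cons])

theorem indexed_nodup (mines : List (Int × Int × Int)) :
    ((PySem.List.enumerate mines 0).map (fun p => (p.2.1, p.2.2.1, p.2.2.2, p.1))).Nodup := by
  have h1 : (PySem.List.enumerate mines 0).Pairwise (fun p q => p.1 < q.1) :=
    PySem.List.pairwise_lt_enumerate _ _
  exact h1.map _ (fun a b hab heq => absurd (congrArg (fun r => r.2.2.2) heq)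
    (by simp only; exact fun h => absurd h (ne_of_lt hab)))

theorem indexed_elem {mines : List (Int × Int × Int)} {a : Int × Int × Int × Int}
    (ha : a ∈ (PySem.List.enumerate mines 0).map (fun p => (p.2.1, p.2.2.1, p.2.2.2, p.1))) :
    ∃ (ia : Nat) (h : ia < mines.length),
      a = (mines[ia].1, mines[ia].2.1, mines[ia].2.2, (ia : Int)) := by
  obtain ⟨p, hp, rfl⟩ := List.mem_map.mp ha
  obtain ⟨kk, hk, rfl⟩ := (PySem.List.mem_enumerate_iff _ _ _).mp hp
  exact ⟨kk, hk, by simp⟩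

theorem pyAdj_symm (k : Int) (p q : Int × Int × Int) : PyAdj k p q = PyAdj k q p := by
  unfold PyAdj
  have h1 : decide (p.1 = q.1 ∧ |q.2.1 - p.2.1| ≤ k) = decide (q.1 = p.1 ∧ |p.2.1 - q.2.1| ≤ k) :=
    decide_eq_decide.mpr (by constructor <;> rintro ⟨h, h2⟩ <;> exact ⟨h.symm, by rwa [abs_sub_comm]⟩)
  have h2 : decide (p.2.1 = q.2.1 ∧ |q.1 - p.1| ≤ k) = decide (q.2.1 = p.2.1 ∧ |p.1 - q.1| ≤ k) :=
    decide_eq_decide.mpr (by constructor <;> rintro ⟨h, h2⟩ <;> exact ⟨h.symm, by rwa [abs_sub_comm]⟩)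
  rw [h1, h2]

theorem noadj_all {k : Int} {mines : List (Int × Int × Int)}
    (hpw : mines.Pairwise (fun a b => PyAdj k a b = false))
    {ia ib : Nat} (ha : ia < mines.length) (hb : ib < mines.length) (hne : ia ≠ ib) :
    PyAdj k mines[ia] mines[ib] = false := by
  rcases Nat.lt_or_ge ia ib with h | h
  · exact List.pairwise_iff_getElem.mp hpw ia ib ha hb h
  · rw [pyAdj_symm]
    exact List.pairwise_iff_getElem.mp hpw ib ia hb ha (by omega)

theorem edges_nil {k : Int} {mines : List (Int × Int × Int)} {s : List (Int × Int × Int × Int)}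
    (hs : s.Perm ((PySem.List.enumerate mines 0).map (fun p => (p.2.1, p.2.2.1, p.2.2.2, p.1))))
    (hpw : mines.Pairwise (fun a b => PyAdj k a b = false))
    (f : (Int × Int × Int × Int) × (Int × Int × Int × Int) → Option (Int × Int))
    (hf : ∀ a b, f (a, b) ≠ none → PyAdj k (a.1, a.2.1, a.2.2.1) (b.1, b.2.1, b.2.2.1) = true) :
    (s.zip s.tail).filterMap f = [] := by
  rw [List.filterMap_eq_nil_iff]
  rintro ⟨a, b⟩ hab
  by_contra hne
  have hadj := hf a b hne
  have hnd : s.Nodup := (hs.nodup_iff).mpr (indexed_nodup mines)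
  have hab_ne : a ≠ b := zip_tail_ne s hnd (a, b) hab
  have ha := hs.subset (List.of_mem_zip hab).1
  have hb := hs.subset (List.mem_of_mem_tail (List.of_mem_zip hab).2)
  obtain ⟨ia, hia, rfl⟩ := indexed_elem ha
  obtain ⟨ib, hib, rfl⟩ := indexed_elem hb
  have hne2 : ia ≠ ib := fun h => hab_ne (by subst h; rfl)
  have hfalse := noadj_all hpw hia hib hne2
  have hadj' : PyAdj k mines[ia] mines[ib] = true := hadj
  rw [hfalse] at hadj'
  cases hadj'

theorem hf_edge1 (k : Int) : ∀ a b : Int × Int × Int × Int, edge1 k (a, b) ≠ none →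
    PyAdj k (a.1, a.2.1, a.2.2.1) (b.1, b.2.1, b.2.2.1) = true := by
  intro a b h
  unfold edge1 at h
  split_ifs at h with hc
  · have hc1 : a.1 = b.1 := hc.1
    have hc2 : |b.2.1 - a.2.1| ≤ k := hc.2
    unfold PyAdj
    simp [hc1, hc2]
  · exact absurd rfl h

theorem hf_edge2 (k : Int) : ∀ a b : Int × Int × Int × Int, edge2 k (a, b) ≠ none →
    PyAdj k (a.1, a.2.1, a.2.2.1) (b.1, b.2.1, b.2.2.1) = true := by
  intro a b h
  unfold edge2 at h
  split_ifs at h with hc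
  · have hc1 : a.2.1 = b.2.1 := hc.1
    have hc2 : |b.1 - a.1| ≤ k := hc.2
    unfold PyAdj
    simp [hc1, hc2]
  · exact absurd rfl h

theorem pyRange_toNat (n : Int) :
    PySem.List.pyRange 0 n 1 = PySem.List.pyRange 0 ((n.toNat : Nat) : Int) 1 := by
  by_cases h : 0 ≤ n
  · rw [Int.toNat_of_nonneg h]
  · rw [PySem.List.pyRange_one_eq_nil (by omega), PySem.List.pyRange_one_eq_nil (by omega)]

theorem caseA_eq_caseB (tc : Int × Int × List (Int × Int × Int))
    (hpre : tc.1 ≤ (tc.2.2.length : Int) ∧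
      (tc.1 = (tc.2.2.length : Int) ∨ tc.2.2.Pairwise (fun a b => PyAdj tc.2.1 a b = false))) :
    caseA tc = caseB tc := by
  obtain ⟨n, k, mines⟩ := tc
  obtain ⟨hle, heq | hpw⟩ := hpre
  case inr =>
    -- no blast-adjacent pair at all: no union is ever attempted on either side
    simp only [caseA, caseB]
    set I := (PySem.List.enumerate mines 0).map (fun p => (p.2.1, p.2.2.1, p.2.2.2, p.1)) with hI
    set s1 := PySem.List.sorted2 I (fun e => e.1) (fun e => e.2.1) false with hs1
    set s2 := PySem.List.sorted2 s1 (fun e => e.2.1) (fun e => e.1) false with hs2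
    rw [PySem.List.slice_from_one s1, PySem.List.slice_from_one s2]
    rw [loopA2_top k s2, loopA1_top k s1]
    have hp1 : s1.Perm I := by rw [hs1]; exact PySem.List.sorted2_perm I _ _ false
    have hp2 : s2.Perm I := by
      rw [hs2]
      exact (PySem.List.sorted2_perm s1 _ _ false).trans hp1
    have hE1 : (s1.zip s1.tail).filterMap (edge1 k) = [] :=
      edges_nil (hI ▸ hp1) hpw (edge1 k) (hf_edge1 k)
    have hE2 : (s2.zip s2.tail).filterMap (edge2 k) = [] :=
      edges_nil (hI ▸ hp2) hpw (edge2 k) (hf_edge2 k)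
    rw [hE1, hE2]
    simp only [List.foldl_nil, List.append_nil, List.nil_append]
    simp only [tolistA]
    rw [pyRange_toNat n]
    rw [roots_eq (good_init n.toNat)]
    set C := (PySem.List.enumerate (PySem.List.pyRange 0 ((n.toNat : Nat) : Int) 1) 0).filterMap
      (fun p => if p.2 = p.1 then
        some (PySem.List.pyGetD (mines.map (fun mn => mn.2.2)) p.1 0) else none) with hC
    rw [← PySem.List.length_sorted C (fun x => x) false]
    exact final_eq (PySem.List.sorted C (fun x => x) false)
  case inl =>
  simp only at heq
  subst heq
  simp only [caseA, caseB]
  set I := (PySem.List.enumerate mines 0).map (fun p => (p.2.1, p.2.2.1, p.2.2.2, p.1)) with hI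
  set s1 := PySem.List.sorted2 I (fun e => e.1) (fun e => e.2.1) false with hs1
  set s2 := PySem.List.sorted2 s1 (fun e => e.2.1) (fun e => e.1) false with hs2
  rw [PySem.List.slice_from_one s1, PySem.List.slice_from_one s2]
  rw [loopA2_top k s2, loopA1_top k s1, ← List.foldl_append]
  have hmem1 : ∀ a ∈ s1, ∃ i : Nat, a.2.2.2 = (i : Int) ∧ i < mines.length := by
    intro a ha
    have hp1 : s1.Perm I := by rw [hs1]; exact PySem.List.sorted2_perm I _ _ false
    exact indexed_idx a (hp1.subset ha)
  have hmem2 : ∀ a ∈ s2, ∃ i : Nat, a.2.2.2 = (i : Int) ∧ i < mines.length := by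
    intro a ha
    have hp2 : s2.Perm s1 := by rw [hs2]; exact PySem.List.sorted2_perm s1 _ _ false
    exact hmem1 a (hp2.subset ha)
  have hok : ∀ e ∈ (s1.zip s1.tail).filterMap (edge1 k) ++ (s2.zip s2.tail).filterMap (edge2 k),
      EdgeOk mines.length e := by
    intro e he
    rcases List.mem_append.mp he with h | h
    · exact edges_ok hmem1 (edge1 k) (hedge1 k) e h
    · exact edges_ok hmem2 (edge2 k) (hedge2 k) e h
  obtain ⟨par', labels', mins', hA, hB, hg'⟩ :=
    fold_edges ((s1.zip s1.tail).filterMap (edge1 k) ++ (s2.zip s2.tail).filterMap (edge2 k))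
      (PySem.List.pyRange 0 (mines.length : Int) 1) (PySem.List.pyRange 0 (mines.length : Int) 1)
      (mines.map (fun mn => mn.2.2)) (good_init mines.length) hok
  rw [hA, hB]
  simp only [tolistA]
  rw [roots_eq hg']
  set C := (PySem.List.enumerate labels' 0).filterMap
    (fun p => if p.2 = p.1 then some (PySem.List.pyGetD mins' p.1 0) else none) with hC
  rw [← PySem.List.length_sorted C (fun x => x) false]
  exact final_eq (PySem.List.sorted C (fun x => x) false)

-- ===== VERDICT (by name: the statement is the Claim_ definition above) =====
theorem calculate_minimum_detonation_time_spec : Claim_equal_calculate_minimum_detonation_time := by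
  intro t tcs _ hpre
  unfold Spec_calculate_minimum_detonation_time calculate_minimum_detonation_time calculate_minimum_detonation_time_alt
  exact List.map_congr_left (fun tc htc => caseA_eq_caseB tc (hpre tc htc))
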